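-- pv_equiv track=rewrite | github.com/mini-full/Structure-and-Interpretation-of-Computer-Programs | Lab/lab03/lab03.py | get_k_run_starter
-- ===== SOURCE A (Python) =====
-- def get_k_run_starter(n, k):
--     """
--     >>> get_k_run_starter(123444345, 0) # example from description
--     3
--     >>> get_k_run_starter(123444345, 1)
--     4
--     >>> get_k_run_starter(123444345, 2)
--     4
--     >>> get_k_run_starter(123444345, 3)
--     1
--     >>> get_k_run_starter(123412341234, 1)
--     1
--     >>> get_k_run_starter(1234234534564567, 0)
--     4
--     >>> get_k_run_starter(1234234534564567, 1)
--     3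
--     >>> get_k_run_starter(1234234534564567, 2)
--     2
--     """
--     i = 0
--     final = None
--     while i <= k:
--         while n > 10 and (n % 10 > (n // 10) % 10):
--             n //= 10
--         final = n % 10
--         i = i + 1
--         n = n // 10
--     return final
-- ===== SOURCE B (Python) =====
-- def get_k_run_starter(n, k):
--     # Extract the digits of n, least-significant first, in one pass.
--     digits = [n % 10]
--     while n >= 10:
--         n //= 10
--         digits.append(n % 10)
--     # A digit starts a run (seen from the right) iff it is <= its left
--     # neighbour; the most significant digit always starts the final run.
--     starters = [d for d, left in zip(digits, digits[1:]) if d <= left]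
--     starters.append(digits[-1])
--     return starters[k] if k < len(starters) else 0
-- ===== Notes on version B (the rewrite author's own statement) =====
-- stated objective: simpler
-- what changed: A peels run-starter digits off n with two nested while loops over k+1 rounds; B extracts the digit list once, selects all run starters with a single pairwise comparison pass, and indexes that list.
-- outside the precondition, e.g. on get_k_run_starter(-123, 1): A returns 7, B returns 0; on get_k_run_starter(123, -1): A returns None, B returns 1
import Mathlib
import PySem

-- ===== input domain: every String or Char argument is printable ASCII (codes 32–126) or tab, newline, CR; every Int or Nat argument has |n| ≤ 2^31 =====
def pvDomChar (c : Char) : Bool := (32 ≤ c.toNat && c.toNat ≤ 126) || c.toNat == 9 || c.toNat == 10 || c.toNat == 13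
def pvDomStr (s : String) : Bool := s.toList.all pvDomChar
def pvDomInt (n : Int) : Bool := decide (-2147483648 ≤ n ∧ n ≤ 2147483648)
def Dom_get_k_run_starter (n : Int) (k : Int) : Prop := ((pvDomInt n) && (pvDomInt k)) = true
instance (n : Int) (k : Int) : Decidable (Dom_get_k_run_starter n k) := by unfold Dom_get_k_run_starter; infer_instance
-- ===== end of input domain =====

-- B replaces A's nested while loops with one digit-extraction pass, a pairwise run-starter
-- selection and a single list index (objective: simpler).

-- ===== PORT A =====
-- inner while loop: while n > 10 and (n % 10 > (n // 10) % 10): n //= 10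
def stripA (n : Int) : Int :=
  if _h : 10 < n ∧ PySem.Int.mod (PySem.Int.floordiv n 10) 10 < PySem.Int.mod n 10 then
    stripA (PySem.Int.floordiv n 10)
  else n
termination_by n.toNat
decreasing_by
  rw [PySem.Int.floordiv_eq_ediv_of_pos (by omega : (0:Int) < 10)]
  omega

-- outer while loop, one step per iteration; `final` starts as Python's None, modelled by the
-- placeholder 0 which is returned only when the loop body never runs (k < 0, outside Pre_).
def loopA (j : Nat) (n : Int) (final : Int) : Int :=
  match j with
  | 0 => final
  | j + 1 =>
    let m := stripA n
    loopA j (PySem.Int.floordiv m 10) (PySem.Int.mod m 10)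

def get_k_run_starter (n : Int) (k : Int) : Int :=
  loopA (k + 1).toNat n 0

-- ===== PORT B =====
-- digits of n, least-significant first: digits = [n % 10]; while n >= 10: n //= 10; digits.append(n % 10)
def digitsB (n : Int) : List Int :=
  if _h : 10 ≤ n then
    PySem.Int.mod n 10 :: digitsB (PySem.Int.floordiv n 10)
  else [PySem.Int.mod n 10]
termination_by n.toNat
decreasing_by
  rw [PySem.Int.floordiv_eq_ediv_of_pos (by omega : (0:Int) < 10)]
  omega

-- starters = [d for d, left in zip(digits, digits[1:]) if d <= left]; starters.append(digits[-1])
-- digits is never empty, so digits[-1] is its last element (getLastD's default is never used).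
def startersB (ds : List Int) : List Int :=
  ((ds.zip (PySem.List.slice ds (some 1) none)).filter (fun p => p.1 ≤ p.2)).map (fun p => p.1)
    ++ [ds.getLastD 0]

def get_k_run_starter_alt (n : Int) (k : Int) : Int :=
  let starters := startersB (digitsB n)
  if k < (starters.length : Int) then (PySem.List.pyGet? starters k).getD 0 else 0

-- ===== PRECONDITION & SPEC =====
-- Pre_ excludes negative k, on which A returns None (no Int value), and negative n, on which
-- A's floor-division digit peeling yields tens-complement artefacts (eventually all 9s) that
-- no reading of "digits of n" matches — a corner no caller would specify.
def Pre_get_k_run_starter (n : Int) (k : Int) : Prop := 0 ≤ n ∧ 0 ≤ k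
instance (n : Int) (k : Int) : Decidable (Pre_get_k_run_starter n k) := by
  unfold Pre_get_k_run_starter; infer_instance

def pvWitness_get_k_run_starter : Int × Int := (123444345, 1)

def Spec_get_k_run_starter (n : Int) (k : Int) (out : Int) : Prop := out = get_k_run_starter_alt n k
instance (n : Int) (k : Int) (out : Int) : Decidable (Spec_get_k_run_starter n k out) := by
  unfold Spec_get_k_run_starter; infer_instance

-- ===== CLAIM (what is proved, stated in full; the proofs are below) =====
def Claim_equal_get_k_run_starter : Prop := ∀ (n : Int) (k : Int), Dom_get_k_run_starter n k → Pre_get_k_run_starter n k → Spec_get_k_run_starter n k (get_k_run_starter n k)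

-- ===== LEMMAS AND PROOFS =====

theorem stripA_eq_of_strip {n : Int} (h1 : 10 < n)
    (h2 : PySem.Int.mod (PySem.Int.floordiv n 10) 10 < PySem.Int.mod n 10) :
    stripA n = stripA (PySem.Int.floordiv n 10) := by
  rw [stripA, dif_pos ⟨h1, h2⟩]

theorem stripA_eq_self {n : Int}
    (h : ¬ (10 < n ∧ PySem.Int.mod (PySem.Int.floordiv n 10) 10 < PySem.Int.mod n 10)) :
    stripA n = n := by
  rw [stripA, dif_neg h]

theorem loopA_succ (j : Nat) (n acc : Int) :
    loopA (j + 1) n acc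
      = loopA j (PySem.Int.floordiv (stripA n) 10) (PySem.Int.mod (stripA n) 10) := rfl

theorem loopA_zero_n (j : Nat) (acc : Int) : loopA (j + 1) 0 acc = 0 := by
  induction j generalizing acc with
  | zero =>
    rw [loopA_succ, stripA_eq_self (by norm_num)]
    simp [PySem.Int.mod, loopA]
  | succ j ih =>
    rw [loopA_succ, stripA_eq_self (by norm_num),
      PySem.Int.floordiv_eq_ediv_of_pos (by omega : (0:Int) < 10)]
    exact ih _

theorem digitsB_head (n : Int) :
    ∃ t, digitsB n = PySem.Int.mod n 10 :: t := by
  rw [digitsB]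
  split
  · exact ⟨_, rfl⟩
  · exact ⟨[], rfl⟩

theorem startersB_single (x : Int) : startersB [x] = [x] := by
  simp [startersB, PySem.List.slice_from_one]

theorem startersB_cons_le {d0 d1 : Int} (t : List Int) (h : d0 ≤ d1) :
    startersB (d0 :: d1 :: t) = d0 :: startersB (d1 :: t) := by
  simp [startersB, PySem.List.slice_from_one, h]

theorem startersB_cons_gt {d0 d1 : Int} (t : List Int) (h : ¬ d0 ≤ d1) :
    startersB (d0 :: d1 :: t) = startersB (d1 :: t) := by
  simp [startersB, PySem.List.slice_from_one, h]

theorem main_lemma (n : Int) (hn : 0 ≤ n) (j : Nat) (acc : Int) :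
    loopA (j + 1) n acc = (startersB (digitsB n)).getD j 0 := by
  have h10 : (0:Int) < 10 := by omega
  have hm : PySem.Int.mod n 10 = n % 10 := PySem.Int.mod_eq_emod_of_pos h10
  have hf : PySem.Int.floordiv n 10 = n / 10 := PySem.Int.floordiv_eq_ediv_of_pos h10
  have hm2 : PySem.Int.mod (PySem.Int.floordiv n 10) 10 = (n / 10) % 10 := by
    rw [hf, PySem.Int.mod_eq_emod_of_pos h10]
  by_cases hbig : 10 ≤ n
  · have hdig : digitsB n = PySem.Int.mod n 10 :: digitsB (PySem.Int.floordiv n 10) := by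
      rw [digitsB, dif_pos hbig]
    obtain ⟨t, ht⟩ := digitsB_head (PySem.Int.floordiv n 10)
    have hn' : (0:Int) ≤ PySem.Int.floordiv n 10 := by rw [hf]; omega
    by_cases hstrip : PySem.Int.mod (PySem.Int.floordiv n 10) 10 < PySem.Int.mod n 10
    · -- the inner while loop strips the last digit, which is not a run starter
      have hgt : 10 < n := by
        rcases lt_or_eq_of_le hbig with h | h
        · exact h
        · exfalso; rw [hm, hm2] at hstrip; omega
      have hloop : loopA (j + 1) n acc = loopA (j + 1) (PySem.Int.floordiv n 10) acc := by
        rw [loopA_succ, loopA_succ, stripA_eq_of_strip hgt hstrip]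
      rw [hloop, main_lemma (PySem.Int.floordiv n 10) hn' j acc, hdig, ht,
        startersB_cons_gt t (by rw [ht] at *; omega)]
    · -- the last digit is a run starter
      have hs : stripA n = n := stripA_eq_self (fun h => hstrip h.2)
      have hstep : loopA (j + 1) n acc
          = loopA j (PySem.Int.floordiv n 10) (PySem.Int.mod n 10) := by
        rw [loopA_succ, hs]
      rw [hdig, ht, startersB_cons_le t (by omega)]
      cases j with
      | zero => rw [hstep]; rfl
      | succ j' =>
        rw [hstep, loopA_succ]
        rw [show loopA j' (PySem.Int.floordiv (stripA (PySem.Int.floordiv n 10)) 10)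
              (PySem.Int.mod (stripA (PySem.Int.floordiv n 10)) 10)
            = loopA (j' + 1) (PySem.Int.floordiv n 10) (PySem.Int.mod n 10) from rfl]
        rw [main_lemma (PySem.Int.floordiv n 10) hn' j' _, ht]
        rfl
  · -- single digit: digits = [n % 10], starters = [n % 10]
    have hdig : digitsB n = [PySem.Int.mod n 10] := by
      rw [digitsB, dif_neg hbig]
    have hs : stripA n = n := stripA_eq_self (fun h => hbig (le_of_lt h.1))
    have hz : PySem.Int.floordiv n 10 = 0 := by rw [hf]; omega
    have hstep : loopA (j + 1) n acc = loopA j 0 (PySem.Int.mod n 10) := by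
      rw [loopA_succ, hs, hz]
    cases j with
    | zero => rw [hstep, hdig, startersB_single]; rfl
    | succ j' =>
      rw [hstep, loopA_zero_n, hdig, startersB_single]
      rfl
termination_by n.toNat
decreasing_by
  all_goals rw [PySem.Int.floordiv_eq_ediv_of_pos (by omega : (0:Int) < 10)]; omega

-- ===== VERDICT (by name: the statement is the Claim_ definition above) =====
theorem get_k_run_starter_spec : Claim_equal_get_k_run_starter := by
  intro n k _ hpre
  obtain ⟨hn, hk⟩ := hpre
  obtain ⟨m, rfl⟩ : ∃ m : Nat, k = (m : Int) := ⟨k.toNat, by omega⟩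
  unfold Spec_get_k_run_starter get_k_run_starter get_k_run_starter_alt
  have hcnt : ((m : Int) + 1).toNat = m + 1 := by omega
  rw [hcnt, main_lemma n hn m 0]
  set st := startersB (digitsB n) with hst
  by_cases hlt : (m : Int) < (st.length : Int)
  · have hlt' : m < st.length := by omega
    rw [if_pos hlt]
    simp [List.getD_eq_getElem?_getD, hlt']
  · have hge : st.length ≤ m := by omega
    rw [if_neg hlt]
    simp [List.getD_eq_getElem?_getD, List.getElem?_eq_none hge]
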